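-- pv_equiv track=rewrite | github.com/MistContinousDoing/someFile | compare-script.py | extract_commands_and_responses
-- ===== SOURCE A (Python) =====
-- def extract_commands_and_responses(responses):
--     responses_list = []
--     current_command = None
--     for line in responses:
--         if line.startswith("Command:"):
--             if current_command is not None:
--                 responses_list.append(current_command)
--             current_command = {'command': line[9:].strip(), 'response': ''}
--         elif current_command is not None:
--             current_command['response'] += line + '\n'
--     if current_command is not None:
--         responses_list.append(current_command)
--     return responses_list
-- ===== SOURCE B (Python) =====
-- def extract_commands_and_responses(responses):
--     # Partition into blocks (header, body-lines) first, then map each block to a dict.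
--     lines = list(responses)
--     n = len(lines)
--     blocks = []
--     i = 0
--     while i < n and not lines[i].startswith("Command:"):
--         i += 1
--     while i < n:
--         j = i + 1
--         while j < n and not lines[j].startswith("Command:"):
--             j += 1
--         blocks.append((lines[i], lines[i + 1:j]))
--         i = j
--     return [{'command': h[9:].strip(),
--              'response': ''.join(l + '\n' for l in body)}
--             for h, body in blocks]
-- ===== Notes on version B (the rewrite author's own statement) =====
-- stated objective: alternative
-- what changed: B first partitions the line list into (header, body) blocks with explicit index scans, then maps each block to its dict in one comprehension, instead of A's single stateful fold carrying a mutable current dict and flush logic.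
import Mathlib
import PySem

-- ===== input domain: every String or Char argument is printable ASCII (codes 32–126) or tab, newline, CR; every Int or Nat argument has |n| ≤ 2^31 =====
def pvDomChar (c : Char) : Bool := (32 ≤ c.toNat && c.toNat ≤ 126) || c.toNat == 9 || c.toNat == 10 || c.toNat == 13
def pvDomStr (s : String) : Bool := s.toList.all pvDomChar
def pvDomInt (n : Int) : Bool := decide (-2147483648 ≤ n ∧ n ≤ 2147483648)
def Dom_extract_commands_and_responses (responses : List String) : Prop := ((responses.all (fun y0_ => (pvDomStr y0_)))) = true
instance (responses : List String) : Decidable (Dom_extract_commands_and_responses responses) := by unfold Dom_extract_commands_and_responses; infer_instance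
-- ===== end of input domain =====

-- B partitions the lines into (header, body) blocks first and then maps each block to a
-- dict, instead of A's single stateful fold with a mutable current dict; same cost.

-- line[9:].strip()
def pvHeaderCmd (l : String) : String := PySem.Str.strip (PySem.Str.slice l (some 9) none)
-- line + '\n' ; string concatenation is ported exactly on List Char
def pvLineNl (l : String) : List Char := l.toList ++ ['\n']

-- ===== PORT A =====
-- the current dict {'command': c, 'response': r} as an association list
def pvMkA (c : String × List Char) : List (String × String) :=
  [("command", c.1), ("response", String.ofList c.2)]

-- the for-loop of A: state = (responses_list so far, current_command); final flush at []
def pvLoopA : List String → List (List (String × String)) → Option (String × List Char) →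
    List (List (String × String))
  | [], acc, cur => match cur with | some c => acc ++ [pvMkA c] | none => acc
  | l :: ls, acc, cur =>
    if PySem.Str.startswith l "Command:" then
      pvLoopA ls (match cur with | some c => acc ++ [pvMkA c] | none => acc)
        (some (pvHeaderCmd l, []))
    else
      match cur with
      | some c => pvLoopA ls acc (some (c.1, c.2 ++ pvLineNl l))
      | none => pvLoopA ls acc none

def extract_commands_and_responses (responses : List String) : List (List (String × String)) :=
  pvLoopA responses [] none

-- ===== PORT B =====
def pvNotHeader (l : String) : Bool := !(PySem.Str.startswith l "Command:")

-- the block-collecting while loops of B: skip non-headers, then (header, body) blocks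
def pvBlocks : List String → List (String × List String)
  | [] => []
  | l :: ls =>
    if PySem.Str.startswith l "Command:" then
      (l, ls.takeWhile pvNotHeader) :: pvBlocks (ls.dropWhile pvNotHeader)
    else pvBlocks ls
termination_by ls => ls.length
decreasing_by
  · simpa using Nat.lt_succ_of_le (List.length_dropWhile_le ..)
  · simp

-- {'command': h[9:].strip(), 'response': ''.join(l + '\n' for l in body)}
def pvMkB (b : String × List String) : List (String × String) :=
  [("command", pvHeaderCmd b.1),
   ("response", String.ofList (PySem.Chars.join [] (b.2.map pvLineNl)))]

def extract_commands_and_responses_alt (responses : List String) : List (List (String × String)) :=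
  (pvBlocks responses).map pvMkB

-- ===== PRECONDITION & SPEC =====
def Spec_extract_commands_and_responses (responses : List String) (out : List (List (String × String))) : Prop := out = extract_commands_and_responses_alt responses
instance (responses : List String) (out : List (List (String × String))) : Decidable (Spec_extract_commands_and_responses responses out) := by unfold Spec_extract_commands_and_responses; infer_instance

-- ===== CLAIM (what is proved, stated in full; the proofs are below) =====
def Claim_equal_extract_commands_and_responses : Prop := ∀ (responses : List String), Dom_extract_commands_and_responses responses → Spec_extract_commands_and_responses responses (extract_commands_and_responses responses)

-- ===== LEMMAS AND PROOFS =====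

-- ''.join on char lists is flatten
theorem pv_join_nil_flatten (xss : List (List Char)) :
    PySem.Chars.join [] xss = xss.flatten := by
  induction xss with
  | nil => rfl
  | cons x xs ih =>
    cases xs with
    | nil => simp [PySem.Chars.join, List.intercalate, List.intersperse]
    | cons y ys =>
      simp only [PySem.Chars.join, List.intercalate, List.intersperse] at ih ⊢
      simp_all

-- the loop with an open current command: it absorbs the non-header prefix, then flushes
theorem pvLoopA_some (ls : List String) : ∀ (acc : List (List (String × String)))
    (c : String) (r : List Char),
    pvLoopA ls acc (some (c, r)) =
      acc ++ [pvMkA (c, r ++ ((ls.takeWhile pvNotHeader).map pvLineNl).flatten)] ++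
        (pvBlocks (ls.dropWhile pvNotHeader)).map pvMkB := by
  induction ls with
  | nil => intro acc c r; simp [pvLoopA, pvBlocks]
  | cons l ls ih =>
    intro acc c r
    by_cases h : PySem.Str.startswith l "Command:"
    · rw [pvLoopA, if_pos h, ih]
      have hnh : pvNotHeader l = false := by unfold pvNotHeader; rw [h]; rfl
      rw [List.takeWhile_cons, List.dropWhile_cons]
      simp only [hnh, Bool.false_eq_true, ite_false]
      rw [pvBlocks, if_pos h]
      simp [List.append_assoc, pvMkA, pvMkB, pv_join_nil_flatten]
    · rw [pvLoopA, if_neg h, ih]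
      have hnh : pvNotHeader l = true := by
        unfold pvNotHeader; rw [eq_false_of_ne_true h]; rfl
      rw [List.takeWhile_cons, List.dropWhile_cons]
      simp [hnh, pvLineNl]

-- the loop with no current command drops lines until a header, then behaves as pvBlocks
theorem pvLoopA_none (ls : List String) : ∀ (acc : List (List (String × String))),
    pvLoopA ls acc none = acc ++ (pvBlocks ls).map pvMkB := by
  induction ls with
  | nil => intro acc; simp [pvLoopA, pvBlocks]
  | cons l ls ih =>
    intro acc
    by_cases h : PySem.Str.startswith l "Command:"
    · rw [pvLoopA, if_pos h, pvLoopA_some, pvBlocks, if_pos h]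
      simp [pvMkA, pvMkB, pv_join_nil_flatten]
    · rw [pvLoopA, if_neg h, ih, pvBlocks, if_neg h]

-- ===== VERDICT (by name: the statement is the Claim_ definition above) =====
theorem extract_commands_and_responses_spec : Claim_equal_extract_commands_and_responses := by
  intro responses _
  unfold Spec_extract_commands_and_responses extract_commands_and_responses
    extract_commands_and_responses_alt
  rw [pvLoopA_none]
  simp
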